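-- pv_equiv track=rewrite | github.com/leoz0214/HumanVsComputerBenchmark | src/number.py | get_number_result
-- ===== SOURCE A (Python) =====
-- from collections import namedtuple
--
-- NumberResult = namedtuple(
--     "NumberResult",
--     ("score", "numbers", "total_digits", "digit_breakdown")
-- )
--
-- def get_number_result(numbers: list[int]) -> NumberResult:
--     """Generates the results for the number memory test."""
--     score = len(numbers)
--     total_digits = (score * (score + 1)) // 2
--     digit_breakdown = {n: 0 for n in range(10)}
--     for number in numbers:
--         for digit in str(number):
--             digit_breakdown[int(digit)] += 1
--     return NumberResult(score, numbers, total_digits, digit_breakdown)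
-- ===== SOURCE B (Python) =====
-- from collections import namedtuple
--
-- NumberResult = namedtuple(
--     "NumberResult",
--     ("score", "numbers", "total_digits", "digit_breakdown")
-- )
--
-- def get_number_result(numbers):
--     """Generates the results for the number memory test."""
--     score = len(numbers)
--     counts = [0] * 10
--     for n in numbers:
--         if n == 0:
--             counts[0] += 1
--         else:
--             while n > 0:
--                 n, d = divmod(n, 10)
--                 counts[d] += 1
--     digit_breakdown = dict(enumerate(counts))
--     return NumberResult(
--         score, numbers, score * (score + 1) // 2, digit_breakdown)
-- ===== Notes on version B (the rewrite author's own statement) =====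
-- stated objective: alternative
-- what changed: Replaces A's string-based tally (str(n), iterate characters, int(digit) into a pre-seeded dict) with pure divmod arithmetic extracting each decimal digit into a 10-slot list, then dict(enumerate(counts)); Pre_ excludes lists containing a negative number, on which A raises ValueError.
import Mathlib
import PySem

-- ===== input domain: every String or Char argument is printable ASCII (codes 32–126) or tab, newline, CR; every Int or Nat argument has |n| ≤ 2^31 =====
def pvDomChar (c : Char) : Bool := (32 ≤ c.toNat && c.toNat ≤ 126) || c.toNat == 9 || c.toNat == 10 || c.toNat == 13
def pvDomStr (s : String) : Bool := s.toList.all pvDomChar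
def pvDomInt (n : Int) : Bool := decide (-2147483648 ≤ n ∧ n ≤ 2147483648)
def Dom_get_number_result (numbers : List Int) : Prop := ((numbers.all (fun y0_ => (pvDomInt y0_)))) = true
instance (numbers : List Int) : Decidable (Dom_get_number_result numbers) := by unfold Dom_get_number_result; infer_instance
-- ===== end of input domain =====

-- B replaces A's string-based digit tally (str(n), int(digit), pre-seeded dict) with pure
-- divmod arithmetic into a 10-slot list and dict(enumerate(...)) (alternative; same cost).

-- ===== PORT A =====
-- int(digit): exact where it succeeds; Pre_ excludes negative numbers, whose '-' character makes int() raise ValueError.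
def pvDigitVal (c : Char) : Int := (PySem.Int.ofChars? [c]).getD 0

def get_number_result (numbers : List Int) : Int × List Int × Int × (List (Int × Int)) :=
  let score : Int := numbers.length
  let total_digits : Int := PySem.Int.floordiv (score * (score + 1)) 2
  let d0 : PySem.Dict Int Int :=
    (PySem.List.pyRange 0 10 1).foldl (fun d n => d.insert n 0) PySem.Dict.empty
  let d : PySem.Dict Int Int :=
    numbers.foldl (fun d number =>
      (PySem.Int.toChars number).foldl (fun d digit => d.modify (pvDigitVal digit) 0 (· + 1)) d) d0
  (score, numbers, total_digits, d.items)

-- ===== PORT B =====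
-- the 'while n > 0: n, d = divmod(n, 10); counts[d] += 1' loop; fuel n.toNat bounds the
-- iteration count (each step divides by 10), it only makes the recursion total.
def pvDigitLoop (fuel : Nat) (n : Int) (counts : List Int) : List Int :=
  match fuel with
  | 0 => counts
  | fuel + 1 =>
    if 0 < n then
      let d := PySem.Int.mod n 10
      let q := PySem.Int.floordiv n 10
      pvDigitLoop fuel q (counts.set d.toNat (counts.getD d.toNat 0 + 1))
    else counts

def get_number_result_alt (numbers : List Int) : Int × List Int × Int × (List (Int × Int)) :=
  let score : Int := numbers.length
  let counts : List Int :=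
    numbers.foldl (fun counts n =>
      if n = 0 then counts.set 0 (counts.getD 0 0 + 1)
      else pvDigitLoop n.toNat n counts) (List.replicate 10 0)
  let digit_breakdown : List (Int × Int) :=
    ((PySem.List.enumerate counts 0).foldl (fun d p => d.insert p.1 p.2) PySem.Dict.empty).items
  (score, numbers, PySem.Int.floordiv (score * (score + 1)) 2, digit_breakdown)

-- ===== PRECONDITION & SPEC =====
-- Pre_ excludes lists containing a negative number: there A raises ValueError (int('-')).
def Pre_get_number_result (numbers : List Int) : Prop := ∀ n ∈ numbers, 0 ≤ n
instance (numbers : List Int) : Decidable (Pre_get_number_result numbers) := by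
  unfold Pre_get_number_result; infer_instance
def pvWitness_get_number_result : List Int := [12, 305, 7, 0]

def Spec_get_number_result (numbers : List Int) (out : Int × List Int × Int × (List (Int × Int))) : Prop := out = get_number_result_alt numbers
instance (numbers : List Int) (out : Int × List Int × Int × (List (Int × Int))) : Decidable (Spec_get_number_result numbers out) := by unfold Spec_get_number_result; infer_instance

-- ===== CLAIM (what is proved, stated in full; the proofs are below) =====
def Claim_equal_get_number_result : Prop := ∀ (numbers : List Int), Dom_get_number_result numbers → Pre_get_number_result numbers → Spec_get_number_result numbers (get_number_result numbers)

-- ===== LEMMAS AND PROOFS =====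

lemma digitChar_isDigit (m : Nat) (h : m < 10) : (Nat.digitChar m).isDigit := by
  interval_cases m <;> decide

lemma toDigitsCore_digits (f : Nat) : ∀ (n : Nat) (ds : List Char),
    (∀ c ∈ ds, c.isDigit) → ∀ c ∈ Nat.toDigitsCore 10 f n ds, c.isDigit := by
  induction f with
  | zero => intro n ds hds c hc; exact hds c hc
  | succ f ih =>
    intro n ds hds c hc
    rw [Nat.toDigitsCore] at hc
    by_cases hn : n / 10 = 0
    · simp [hn] at hc
      rcases hc with rfl | hc
      · exact digitChar_isDigit _ (Nat.mod_lt _ (by norm_num))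
      · exact hds c hc
    · simp [hn] at hc
      refine ih _ _ ?_ c hc
      intro c' hc'
      rcases List.mem_cons.mp hc' with rfl | hc'
      · exact digitChar_isDigit _ (Nat.mod_lt _ (by norm_num))
      · exact hds c' hc'

lemma toChars_digits (n : Int) (h : 0 ≤ n) : ∀ c ∈ PySem.Int.toChars n, c.isDigit := by
  intro c hc
  rw [PySem.Int.toChars, if_neg (by omega)] at hc
  rw [Nat.toDigits] at hc
  exact toDigitsCore_digits _ _ _ (by simp) c hc

lemma digit_cases (c : Char) (h : c.isDigit) :
    c = '0' ∨ c = '1' ∨ c = '2' ∨ c = '3' ∨ c = '4' ∨ c = '5' ∨ c = '6' ∨ c = '7' ∨ c = '8' ∨ c = '9' := by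
  have h1 : 48 ≤ c.toNat := by simp [Char.isDigit] at h; exact h.1
  have h2 : c.toNat ≤ 57 := by simp [Char.isDigit] at h; exact h.2
  interval_cases hm : c.toNat <;>
  · rw [(Char.ofNat_toNat c).symm.trans (congrArg Char.ofNat hm)]
    decide

lemma pvDigitVal_lit :
    pvDigitVal '0' = 0 ∧ pvDigitVal '1' = 1 ∧ pvDigitVal '2' = 2 ∧ pvDigitVal '3' = 3 ∧ pvDigitVal '4' = 4 ∧
    pvDigitVal '5' = 5 ∧ pvDigitVal '6' = 6 ∧ pvDigitVal '7' = 7 ∧ pvDigitVal '8' = 8 ∧ pvDigitVal '9' = 9 := by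
  decide

-- A's dict loop over a list of digit characters, from any ten-entry state.
lemma foldl_modify_digits (cs : List Char) (h : ∀ c ∈ cs, c.isDigit) :
    ∀ a0 a1 a2 a3 a4 a5 a6 a7 a8 a9 : Int,
    cs.foldl (fun d c => PySem.Dict.modify d (pvDigitVal c) 0 (· + 1))
      (⟨[(0, a0), (1, a1), (2, a2), (3, a3), (4, a4), (5, a5), (6, a6), (7, a7), (8, a8), (9, a9)]⟩ : PySem.Dict Int Int)
    = ⟨[(0, a0 + cs.count '0'), (1, a1 + cs.count '1'), (2, a2 + cs.count '2'), (3, a3 + cs.count '3'),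
        (4, a4 + cs.count '4'), (5, a5 + cs.count '5'), (6, a6 + cs.count '6'), (7, a7 + cs.count '7'),
        (8, a8 + cs.count '8'), (9, a9 + cs.count '9')]⟩ := by
  induction cs with
  | nil => intro _ _ _ _ _ _ _ _ _ _; simp
  | cons c cs ih =>
    have h' : ∀ x ∈ cs, x.isDigit := fun x hx => h x (List.mem_cons_of_mem _ hx)
    intro a0 a1 a2 a3 a4 a5 a6 a7 a8 a9
    rcases digit_cases c (h c List.mem_cons_self) with rfl|rfl|rfl|rfl|rfl|rfl|rfl|rfl|rfl|rfl <;>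
    · rw [List.foldl_cons]
      refine Eq.trans (ih h' _ _ _ _ _ _ _ _ _ _) ?_
      simp [pvDigitVal_lit.1, pvDigitVal_lit.2.1, pvDigitVal_lit.2.2.1,
        pvDigitVal_lit.2.2.2.1, pvDigitVal_lit.2.2.2.2.1, pvDigitVal_lit.2.2.2.2.2.1,
        pvDigitVal_lit.2.2.2.2.2.2.1, pvDigitVal_lit.2.2.2.2.2.2.2.1,
        pvDigitVal_lit.2.2.2.2.2.2.2.2.1, pvDigitVal_lit.2.2.2.2.2.2.2.2.2,
        PySem.Dict.getD, PySem.Dict.get?]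
      omega

-- Nat.toDigitsCore: the accumulator is appended on the right.
lemma toDigitsCore_acc : ∀ (f n : Nat) (ds : List Char),
    Nat.toDigitsCore 10 f n ds = Nat.toDigitsCore 10 f n [] ++ ds := by
  intro f
  induction f with
  | zero => intro n ds; simp [Nat.toDigitsCore]
  | succ f ih =>
    intro n ds
    rw [Nat.toDigitsCore, Nat.toDigitsCore]
    by_cases hn : n / 10 = 0
    · simp [hn]
    · simp only [hn, if_false]
      rw [ih (n / 10) [Nat.digitChar (n % 10)], ih (n / 10) (Nat.digitChar (n % 10) :: ds),
        List.append_assoc]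
      rfl

-- Nat.toDigitsCore: any sufficient fuel gives the same digits.
lemma toDigitsCore_fuel : ∀ (f f' n : Nat) (ds : List Char), n < f → n < f' →
    Nat.toDigitsCore 10 f n ds = Nat.toDigitsCore 10 f' n ds := by
  intro f
  induction f with
  | zero => intro f' n ds h _; omega
  | succ f ih =>
    intro f' n ds h h'
    obtain ⟨f'', rfl⟩ : ∃ f'', f' = f'' + 1 := ⟨f' - 1, by omega⟩
    rw [Nat.toDigitsCore, Nat.toDigitsCore]
    by_cases hn : n / 10 = 0
    · simp [hn]
    · simp only [hn, if_false]
      have hpos : 0 < n := by omega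
      exact ih f'' (n / 10) _ (by omega) (by omega)

lemma toDigits_small (m : Nat) (h : m < 10) : Nat.toDigits 10 m = [Nat.digitChar m] := by
  rw [Nat.toDigits, Nat.toDigitsCore]
  simp [Nat.div_eq_of_lt h, Nat.mod_eq_of_lt h]

lemma toDigits_step (m : Nat) (h : 10 ≤ m) :
    Nat.toDigits 10 m = Nat.toDigits 10 (m / 10) ++ [Nat.digitChar (m % 10)] := by
  rw [Nat.toDigits, Nat.toDigitsCore]
  have hn : m / 10 ≠ 0 := by omega
  simp only [hn, if_false]
  rw [toDigitsCore_acc, toDigitsCore_fuel m (m / 10 + 1) (m / 10) [] (by omega) (by omega)]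
  rfl

lemma pvDigitLoop_nonpos (f : Nat) (n : Int) (counts : List Int) (h : n ≤ 0) :
    pvDigitLoop f n counts = counts := by
  cases f with
  | zero => rfl
  | succ f => rw [pvDigitLoop, if_neg (by omega)]

-- B's divmod loop on a nonnegative number, from any ten-entry state: it adds each
-- decimal digit's multiplicity, i.e. the character counts of Nat.toDigits 10 n.toNat.
lemma pvDigitLoop_eq : ∀ (fuel : Nat) (n : Int), 0 < n → n.toNat ≤ fuel →
    ∀ a0 a1 a2 a3 a4 a5 a6 a7 a8 a9 : Int,
    pvDigitLoop fuel n [a0, a1, a2, a3, a4, a5, a6, a7, a8, a9]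
    = [a0 + ((Nat.toDigits 10 n.toNat).count '0' : Int), a1 + ((Nat.toDigits 10 n.toNat).count '1' : Int),
       a2 + ((Nat.toDigits 10 n.toNat).count '2' : Int), a3 + ((Nat.toDigits 10 n.toNat).count '3' : Int),
       a4 + ((Nat.toDigits 10 n.toNat).count '4' : Int), a5 + ((Nat.toDigits 10 n.toNat).count '5' : Int),
       a6 + ((Nat.toDigits 10 n.toNat).count '6' : Int), a7 + ((Nat.toDigits 10 n.toNat).count '7' : Int),
       a8 + ((Nat.toDigits 10 n.toNat).count '8' : Int), a9 + ((Nat.toDigits 10 n.toNat).count '9' : Int)] := by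
  intro fuel
  induction fuel with
  | zero => intro n hn hf; omega
  | succ fuel ih =>
    intro n hn hf a0 a1 a2 a3 a4 a5 a6 a7 a8 a9
    obtain ⟨m, rfl⟩ : ∃ m : Nat, n = (m : Int) := ⟨n.toNat, (Int.toNat_of_nonneg (le_of_lt hn)).symm⟩
    have hm : 0 < m := by omega
    have hfm : m ≤ fuel + 1 := by omega
    have hfm' : PySem.Int.mod (m : Int) 10 = ((m % 10 : Nat) : Int) := (Int.ofNat_fmod m 10).symm
    have hfd' : PySem.Int.floordiv (m : Int) 10 = ((m / 10 : Nat) : Int) := (Int.ofNat_fdiv m 10).symm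
    rw [pvDigitLoop, if_pos hn]
    simp only [hfm', hfd', Int.toNat_natCast]
    by_cases hq : m / 10 = 0
    · -- single digit: m = m % 10 < 10, the recursive call gets 0 and stops
      have hm10 : m < 10 := by omega
      have hmm : m % 10 = m := Nat.mod_eq_of_lt hm10
      rw [hq, Nat.cast_zero, pvDigitLoop_nonpos fuel 0 _ (by omega), hmm,
        toDigits_small m hm10]
      interval_cases m <;> simp [Nat.digitChar]
    · -- m ≥ 10: process the last digit, recurse on m / 10
      have hm10 : 10 ≤ m := by omega
      have hq1 : 0 < ((m / 10 : Nat) : Int) := by omega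
      have hq2 : ((m / 10 : Nat) : Int).toNat ≤ fuel := by
        rw [Int.toNat_natCast]; omega
      rw [toDigits_step m hm10]
      have hrec := ih ((m / 10 : Nat) : Int) hq1 hq2
      rw [Int.toNat_natCast] at hrec
      have hr : m % 10 < 10 := Nat.mod_lt _ (by omega)
      interval_cases hk : m % 10 <;>
      · simp only [List.set, List.getD, List.getElem?_cons_zero, List.getElem?_cons_succ,
          Option.getD_some]
        rw [hrec]
        simp [List.count_append, Nat.digitChar]
        omega

-- B's per-number step over the whole list, from any ten-entry state.
lemma b_fold_eq (ns : List Int) (h : ∀ n ∈ ns, 0 ≤ n) :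
    ∀ a0 a1 a2 a3 a4 a5 a6 a7 a8 a9 : Int,
    ns.foldl (fun counts n =>
        if n = 0 then counts.set 0 (counts.getD 0 0 + 1)
        else pvDigitLoop n.toNat n counts) [a0, a1, a2, a3, a4, a5, a6, a7, a8, a9]
    = [a0 + ((ns.flatMap (fun n => PySem.Int.toChars n)).count '0' : Int),
       a1 + ((ns.flatMap (fun n => PySem.Int.toChars n)).count '1' : Int),
       a2 + ((ns.flatMap (fun n => PySem.Int.toChars n)).count '2' : Int),
       a3 + ((ns.flatMap (fun n => PySem.Int.toChars n)).count '3' : Int),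
       a4 + ((ns.flatMap (fun n => PySem.Int.toChars n)).count '4' : Int),
       a5 + ((ns.flatMap (fun n => PySem.Int.toChars n)).count '5' : Int),
       a6 + ((ns.flatMap (fun n => PySem.Int.toChars n)).count '6' : Int),
       a7 + ((ns.flatMap (fun n => PySem.Int.toChars n)).count '7' : Int),
       a8 + ((ns.flatMap (fun n => PySem.Int.toChars n)).count '8' : Int),
       a9 + ((ns.flatMap (fun n => PySem.Int.toChars n)).count '9' : Int)] := by
  induction ns with
  | nil => intro a0 a1 a2 a3 a4 a5 a6 a7 a8 a9; simp
  | cons n ns ih =>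
    intro a0 a1 a2 a3 a4 a5 a6 a7 a8 a9
    have h' : ∀ x ∈ ns, 0 ≤ x := fun x hx => h x (List.mem_cons_of_mem _ hx)
    have hn : 0 ≤ n := h n List.mem_cons_self
    have htc : PySem.Int.toChars n = Nat.toDigits 10 n.toNat := by
      rw [PySem.Int.toChars, if_neg (by omega)]
    rw [List.foldl_cons]
    by_cases h0 : n = 0
    · subst h0
      have hstep : (if (0:Int) = 0 then
            ([a0,a1,a2,a3,a4,a5,a6,a7,a8,a9].set 0 ([a0,a1,a2,a3,a4,a5,a6,a7,a8,a9].getD 0 0 + 1))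
          else pvDigitLoop (0:Int).toNat 0 [a0,a1,a2,a3,a4,a5,a6,a7,a8,a9])
          = [a0+1,a1,a2,a3,a4,a5,a6,a7,a8,a9] := rfl
      rw [hstep, ih h']
      rw [List.flatMap_cons, show PySem.Int.toChars 0 = ['0'] from rfl]
      simp
      omega
    · rw [if_neg h0, pvDigitLoop_eq n.toNat n (by omega) (le_refl _), ih h']
      rw [List.flatMap_cons, htc]
      simp [List.count_append]
      omega

theorem get_number_result_spec : Claim_equal_get_number_result := by
  intro numbers _ hpre
  unfold Spec_get_number_result get_number_result get_number_result_alt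
  refine Prod.ext rfl (Prod.ext rfl (Prod.ext rfl ?_))
  simp only []
  set s : List Char := numbers.flatMap (fun n => PySem.Int.toChars n) with hs
  have hsd : ∀ c ∈ s, c.isDigit := by
    intro c hc
    rw [hs] at hc
    obtain ⟨n, hn, hcn⟩ := List.mem_flatMap.mp hc
    exact toChars_digits n (hpre n hn) c hcn
  -- A's nested loop is the single loop over the concatenation
  have hA : numbers.foldl (fun d number =>
      (PySem.Int.toChars number).foldl (fun d digit => d.modify (pvDigitVal digit) 0 (· + 1)) d)
      ((PySem.List.pyRange 0 10 1).foldl (fun d n => d.insert n 0) PySem.Dict.empty)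
      = s.foldl (fun d c => PySem.Dict.modify d (pvDigitVal c) 0 (· + 1))
          (⟨[(0, 0), (1, 0), (2, 0), (3, 0), (4, 0), (5, 0), (6, 0), (7, 0), (8, 0), (9, 0)]⟩ : PySem.Dict Int Int) := by
    rw [hs, List.foldl_flatMap]
    rfl
  rw [hA, foldl_modify_digits s hsd]
  -- B's arithmetic tally equals the same character counts
  rw [show (List.replicate 10 (0 : Int)) = [0, 0, 0, 0, 0, 0, 0, 0, 0, 0] from rfl,
    b_fold_eq numbers hpre, ← hs]
  -- dict(enumerate(counts)) on a ten-entry list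
  simp [PySem.List.enumerate_cons, PySem.Dict.insert, PySem.Dict.empty, PySem.Dict.contains]
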